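-- pv_equiv track=rewrite | github.com/foxlf823/ADEnormer | metric.py | checkWrongState_BMES
-- ===== SOURCE A (Python) =====
-- def checkWrongState_BMES(labelSequence, size):
--     positionNew = -1
--     positionOther = -1
--     currentLabel = labelSequence[size - 1]
--     assert currentLabel[0] == 'M' or currentLabel[0] == 'E'
--
--     j = size - 2
--     while j >= 0:
--         if positionNew == -1 and currentLabel[2:] == labelSequence[j][2:] and labelSequence[j][0] == 'B' :
--             positionNew = j
--         elif positionOther == -1 and (currentLabel[2:] != labelSequence[j][2:] or labelSequence[j][0] != 'M'):
--             positionOther = j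
--
--         if positionOther != -1 and positionNew != -1:
--             break
--
--         j -= 1
--
--     if positionNew == -1:
--         return False
--     elif positionOther < positionNew:
--         return True
--     else:
--         return False
-- ===== SOURCE B (Python) =====
-- def checkWrongState_BMES(labelSequence, size):
--     currentLabel = labelSequence[size - 1]
--     assert currentLabel[0] == 'M' or currentLabel[0] == 'E'
--     for j in range(size - 2, -1, -1):
--         if currentLabel[2:] == labelSequence[j][2:] and labelSequence[j][0] == 'M':
--             continue
--         return currentLabel[2:] == labelSequence[j][2:] and labelSequence[j][0] == 'B'
--     return False
-- ===== Notes on version B (the rewrite author's own statement) =====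
-- stated objective: simpler
-- what changed: Replaces the two-sentinel scan (positionNew/positionOther tracking plus a final ordering comparison) with a single backward loop that skips matching-M labels and returns at the first non-matching-M position whether it is a matching B.
import Mathlib
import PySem

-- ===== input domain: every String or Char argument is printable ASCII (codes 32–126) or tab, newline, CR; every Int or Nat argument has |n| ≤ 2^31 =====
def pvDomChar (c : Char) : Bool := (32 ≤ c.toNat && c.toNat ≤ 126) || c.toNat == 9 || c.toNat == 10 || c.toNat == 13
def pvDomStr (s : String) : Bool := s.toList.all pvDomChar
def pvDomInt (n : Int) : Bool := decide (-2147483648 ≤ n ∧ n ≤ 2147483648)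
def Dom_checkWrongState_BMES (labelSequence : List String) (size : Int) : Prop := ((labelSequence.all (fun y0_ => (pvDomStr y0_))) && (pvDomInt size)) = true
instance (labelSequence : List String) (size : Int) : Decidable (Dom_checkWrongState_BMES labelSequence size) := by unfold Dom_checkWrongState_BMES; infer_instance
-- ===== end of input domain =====

-- B replaces A's two-sentinel scan by a single backward loop that skips matching-M
-- labels and decides at the first non-matching-M position (objective: simpler).

-- ===== PORT A =====
-- A's while loop, j = n-1 down to 0 (fuel n = remaining iterations); state (positionNew, positionOther).
def pvLoopA (ls : List String) (cur : String) : Nat → Int → Int → Int × Int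
  | 0, pN, pO => (pN, pO)
  | n + 1, pN, pO =>
    let lj := ls.getD n ""
    let st :=
      if pN = -1 ∧ PySem.Str.slice cur (some 2) none = PySem.Str.slice lj (some 2) none
           ∧ PySem.Str.pyGet? lj 0 = some 'B' then ((n : Int), pO)
      else if pO = -1 ∧ (PySem.Str.slice cur (some 2) none ≠ PySem.Str.slice lj (some 2) none
           ∨ PySem.Str.pyGet? lj 0 ≠ some 'M') then (pN, (n : Int))
      else (pN, pO)
    if st.2 ≠ -1 ∧ st.1 ≠ -1 then st
    else pvLoopA ls cur n st.1 st.2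

def checkWrongState_BMES (labelSequence : List String) (size : Int) : Bool :=
  let currentLabel := (PySem.List.pyGet? labelSequence (size - 1)).getD ""
  let p := pvLoopA labelSequence currentLabel (size - 1).toNat (-1) (-1)
  if p.1 = -1 then false
  else if p.2 < p.1 then true
  else false

-- ===== PORT B =====
-- B's for loop over range(size-2, -1, -1): skip matching-M, decide at the first other label.
def pvLoopB (ls : List String) (cur : String) : Nat → Bool
  | 0 => false
  | n + 1 =>
    let lj := ls.getD n ""
    if PySem.Str.slice cur (some 2) none = PySem.Str.slice lj (some 2) none
         ∧ PySem.Str.pyGet? lj 0 = some 'M' then pvLoopB ls cur n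
    else decide (PySem.Str.slice cur (some 2) none = PySem.Str.slice lj (some 2) none
         ∧ PySem.Str.pyGet? lj 0 = some 'B')

def checkWrongState_BMES_alt (labelSequence : List String) (size : Int) : Bool :=
  let currentLabel := (PySem.List.pyGet? labelSequence (size - 1)).getD ""
  pvLoopB labelSequence currentLabel (size - 1).toNat

-- ===== PRECONDITION & SPEC =====
-- Helper predicates for Pre_: a label that (w.r.t. currentLabel's tag) is a matching 'B',
-- and one that is NOT a matching 'M' (the two string tests A's loop performs).
def pvMatchB (cur l : String) : Bool :=
  (PySem.Str.slice cur (some 2) none == PySem.Str.slice l (some 2) none)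
    && (PySem.Str.pyGet? l 0 == some 'B')
def pvOtherL (cur l : String) : Bool :=
  (PySem.Str.slice cur (some 2) none != PySem.Str.slice l (some 2) none)
    || (PySem.Str.pyGet? l 0 != some 'M')

-- Pre_ is exactly the set of inputs on which Python A RETURNS: it excludes the IndexError on
-- labelSequence[size-1], the IndexError/AssertionError on currentLabel[0], and — only when
-- currentLabel[2:] is empty — the IndexError A hits at ""[0] when its scan reaches the last
-- empty label e of labelSequence[:size-1] before both sentinels are set (i.e. unless some
-- matching-B index j1 > e and some other non-matching-M index j2 ≠ j1, j2 > e, exist).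
-- B raises only on a subset of these inputs, so nothing A returns on is excluded.
def Pre_checkWrongState_BMES (labelSequence : List String) (size : Int) : Prop :=
  PySem.Raise.InRange labelSequence.length (size - 1) ∧
  (let cur := (PySem.List.pyGet? labelSequence (size - 1)).getD "";
   let pfx := labelSequence.take (size - 1).toNat;
   (PySem.Str.pyGet? cur 0 = some 'M' ∨ PySem.Str.pyGet? cur 0 = some 'E') ∧
   (PySem.Str.slice cur (some 2) none = "" →
     ∀ e ∈ List.range pfx.length, pfx.getD e "?" = "" →
       (∀ j ∈ List.range pfx.length, e < j → pfx.getD j "?" ≠ "") →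
       ∃ j1 ∈ List.range pfx.length, e < j1 ∧ pvMatchB cur (pfx.getD j1 "") = true ∧
         ∃ j2 ∈ List.range pfx.length, e < j2 ∧ j2 ≠ j1 ∧ pvOtherL cur (pfx.getD j2 "") = true))
instance (labelSequence : List String) (size : Int) : Decidable (Pre_checkWrongState_BMES labelSequence size) := by unfold Pre_checkWrongState_BMES; infer_instance

def pvWitness_checkWrongState_BMES : List String × Int := (["B-x", "M-x"], 2)

def Spec_checkWrongState_BMES (labelSequence : List String) (size : Int) (out : Bool) : Prop := out = checkWrongState_BMES_alt labelSequence size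
instance (labelSequence : List String) (size : Int) (out : Bool) : Decidable (Spec_checkWrongState_BMES labelSequence size out) := by unfold Spec_checkWrongState_BMES; infer_instance

-- ===== CLAIM (what is proved, stated in full; the proofs are below) =====
def Claim_equal_checkWrongState_BMES : Prop := ∀ (labelSequence : List String) (size : Int), Dom_checkWrongState_BMES labelSequence size → Pre_checkWrongState_BMES labelSequence size → Spec_checkWrongState_BMES labelSequence size (checkWrongState_BMES labelSequence size)

-- ===== LEMMAS AND PROOFS =====
-- A's final decision as a function of the loop's end state.
def pvDecide (p : Int × Int) : Bool :=
  if p.1 = -1 then false else if p.2 < p.1 then true else false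

theorem pvDecide_true (a b : Int) (h1 : a ≠ -1) (h2 : b < a) : pvDecide (a, b) = true := by
  simp [pvDecide, h1, h2]

theorem pvDecide_false_ge (a b : Int) (h2 : a ≤ b) : pvDecide (a, b) = false := by
  unfold pvDecide
  split_ifs with h h'
  · rfl
  · omega
  · rfl

theorem pvDecide_none (b : Int) : pvDecide (-1, b) = false := by
  unfold pvDecide
  rw [if_pos rfl]

theorem pvLoopA_new_set (ls : List String) (cur : String) :
    ∀ (n : Nat) (k : Int), 0 ≤ k → (n : Int) ≤ k →
      pvDecide (pvLoopA ls cur n k (-1)) = true := by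
  intro n
  induction n with
  | zero =>
    intro k hk hn
    exact pvDecide_true k (-1) (by omega) (by omega)
  | succ n ih =>
    intro k hk hn
    push_cast at hn
    simp only [pvLoopA]
    split_ifs with a1 a2 a3 a4 a5
    · exact absurd a1.1 (by omega)
    · exact absurd a1.1 (by omega)
    · exact pvDecide_true k (n : Int) (by omega) (by omega)
    · exact (a4 ⟨show (n : Int) ≠ -1 by omega, show k ≠ -1 by omega⟩).elim
    · exact absurd rfl a5.1
    · exact ih k hk (by omega)

theorem pvLoopA_other_set (ls : List String) (cur : String) :
    ∀ (n : Nat) (k : Int), 0 ≤ k → (n : Int) ≤ k →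
      pvDecide (pvLoopA ls cur n (-1) k) = false := by
  intro n
  induction n with
  | zero =>
    intro k hk hn
    exact pvDecide_none k
  | succ n ih =>
    intro k hk hn
    push_cast at hn
    simp only [pvLoopA]
    split_ifs with a1 a2 a3 a4 a5
    · exact pvDecide_false_ge (n : Int) k (by omega)
    · exact (a2 ⟨show k ≠ -1 by omega, show (n : Int) ≠ -1 by omega⟩).elim
    · exact absurd a3.1 (by omega)
    · exact absurd a3.1 (by omega)
    · exact absurd rfl a5.2
    · exact ih k hk (by omega)

theorem pvLoopA_eq_pvLoopB (ls : List String) (cur : String) :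
    ∀ (n : Nat), pvDecide (pvLoopA ls cur n (-1) (-1)) = pvLoopB ls cur n := by
  intro n
  induction n with
  | zero => exact pvDecide_none (-1)
  | succ n ih =>
    simp only [pvLoopA, pvLoopB]
    split_ifs with a1 a2 a3 a4 a5 a6 a7 a8 a9 b1 b2
    · exact absurd rfl a2.1
    · exact absurd rfl a2.1
    · exact absurd (a1.2.2.symm.trans a4.2) (by decide)
    · show pvDecide (pvLoopA ls cur n (n : Int) (-1)) = _
      rw [pvLoopA_new_set ls cur n (n : Int) (by omega) le_rfl]
      exact (decide_eq_true ⟨a1.2.1, a1.2.2⟩).symm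
    · exact absurd rfl a6.2
    · exact absurd rfl a6.2
    · exact a5.2.elim (fun h => (h a8.1).elim) (fun h => (h a8.2).elim)
    · show pvDecide (pvLoopA ls cur n (-1) (n : Int)) = _
      rw [pvLoopA_other_set ls cur n (n : Int) (by omega) le_rfl]
      exact (decide_eq_false (fun h => a1 ⟨by trivial, h⟩)).symm
    · exact absurd rfl a9.1
    · exact absurd rfl a9.1
    · exact ih
    · exfalso
      apply b2
      constructor
      · by_contra hP
        exact a5 ⟨by trivial, Or.inl hP⟩
      · by_contra hQ
        exact a5 ⟨by trivial, Or.inr hQ⟩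

-- ===== VERDICT (by name: the statement is the Claim_ definition above) =====
theorem checkWrongState_BMES_spec : Claim_equal_checkWrongState_BMES := by
  intro ls size _ _
  unfold Spec_checkWrongState_BMES checkWrongState_BMES checkWrongState_BMES_alt
  have h := pvLoopA_eq_pvLoopB ls ((PySem.List.pyGet? ls (size - 1)).getD "") (size - 1).toNat
  simpa [pvDecide] using h
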